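-- pv_equiv track=rewrite | github.com/stevekrenzel/advent_of_code_2021 | 2021/day11/main.py | reset_flashed
-- ===== SOURCE A (Python) =====
-- def cells(grid):
--     for x, row in enumerate(grid):
--         for y, col in enumerate(row):
--             yield (x, y, col)
--
-- def reset_flashed(grid):
--     grid = copy_grid(grid)
--     count = 0
--
--     for (x, y, val) in cells(grid):
--         if val > 9:
--             grid[x][y] = 0
--             count += 1
--
--     return (grid, count)
--
-- def copy_grid(grid):
--     return [row[:] for row in grid]
-- ===== SOURCE B (Python) =====
-- def _solve_row(row, lo, hi):
--     # resolve the half-open index range [lo, hi) of one row by divide and conquer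
--     if hi - lo == 0:
--         return ([], 0)
--     if hi - lo == 1:
--         v = row[lo]
--         return (([0], 1) if v > 9 else ([v], 0))
--     mid = (lo + hi) // 2
--     left, cl = _solve_row(row, lo, mid)
--     right, cr = _solve_row(row, mid, hi)
--     return (left + right, cl + cr)
--
-- def _solve_rows(grid, lo, hi):
--     # resolve the half-open range [lo, hi) of rows by divide and conquer
--     if hi - lo == 0:
--         return ([], 0)
--     if hi - lo == 1:
--         new_row, c = _solve_row(grid[lo], 0, len(grid[lo]))
--         return ([new_row], c)
--     mid = (lo + hi) // 2
--     left, cl = _solve_rows(grid, lo, mid)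
--     right, cr = _solve_rows(grid, mid, hi)
--     return (left + right, cl + cr)
--
-- def reset_flashed(grid):
--     return _solve_rows(grid, 0, len(grid))
-- ===== Notes on version B (the rewrite author's own statement) =====
-- stated objective: alternative
-- what changed: Replaces the copy-grid-then-mutate linear scan over a coordinate generator with a divide-and-conquer recursion on half-open index ranges that splits rows and cells at the midpoint and combines (subgrid, count) results by concatenation and addition.
import Mathlib
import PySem

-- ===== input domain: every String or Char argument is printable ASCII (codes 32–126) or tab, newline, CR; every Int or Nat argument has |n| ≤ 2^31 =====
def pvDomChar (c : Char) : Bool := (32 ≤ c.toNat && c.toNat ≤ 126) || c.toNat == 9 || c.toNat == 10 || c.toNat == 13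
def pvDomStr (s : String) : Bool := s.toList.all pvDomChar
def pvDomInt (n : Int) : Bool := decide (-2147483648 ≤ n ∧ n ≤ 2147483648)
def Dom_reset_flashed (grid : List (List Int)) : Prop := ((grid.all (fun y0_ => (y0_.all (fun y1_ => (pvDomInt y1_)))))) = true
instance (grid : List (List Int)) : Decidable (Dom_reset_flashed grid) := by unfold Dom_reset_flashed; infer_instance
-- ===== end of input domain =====

-- B replaces A's copy-grid-then-mutate linear scan with a divide-and-conquer
-- recursion on half-open index ranges, combining (subgrid, count) pairs by
-- concatenation and addition (objective: alternative, not faster).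
-- Equivalence of return values is proved on all inputs.

-- ===== PORT A =====
-- copy_grid(grid) = [row[:] for row in grid]; row[:] is PySem slice with no bounds
def pvCopyGrid (grid : List (List Int)) : List (List Int) :=
  grid.map (fun row => PySem.List.slice row none none)

-- cells(grid): yields (x, y, col) for each cell; List.zipIdx gives (elem, index)
def pvCellsA (grid : List (List Int)) : List (Nat × Nat × Int) :=
  (grid.zipIdx).flatMap (fun rx => (rx.1.zipIdx).map (fun cy => (rx.2, cy.2, cy.1)))

-- loop body: if val > 9: grid[x][y] = 0; count += 1
def pvStepA (st : List (List Int) × Int) (c : Nat × Nat × Int) : List (List Int) × Int :=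
  if c.2.2 > 9 then (st.1.set c.1 ((st.1.getD c.1 []).set c.2.1 0), st.2 + 1) else st

def reset_flashed (grid : List (List Int)) : List (List Int) × Int :=
  let g := pvCopyGrid grid
  (pvCellsA g).foldl pvStepA (g, 0)

-- ===== PORT B =====
-- _solve_row(row, lo, hi): divide and conquer on the half-open cell range [lo, hi).
-- row[lo] is only evaluated with lo < len(row), where it equals getD lo 0.
def pvSolveRow (row : List Int) (lo hi : Nat) : List Int × Int :=
  if hi - lo = 0 then ([], 0)
  else if hi - lo = 1 then
    let v := row.getD lo 0
    if v > 9 then ([0], 1) else ([v], 0)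
  else
    let mid := (lo + hi) / 2
    let l := pvSolveRow row lo mid
    let r := pvSolveRow row mid hi
    (l.1 ++ r.1, l.2 + r.2)
termination_by hi - lo
decreasing_by all_goals omega

-- _solve_rows(grid, lo, hi): divide and conquer on the half-open row range [lo, hi).
def pvSolveRows (grid : List (List Int)) (lo hi : Nat) : List (List Int) × Int :=
  if hi - lo = 0 then ([], 0)
  else if hi - lo = 1 then
    let row := grid.getD lo []
    let rc := pvSolveRow row 0 row.length
    ([rc.1], rc.2)
  else
    let mid := (lo + hi) / 2
    let l := pvSolveRows grid lo mid
    let r := pvSolveRows grid mid hi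
    (l.1 ++ r.1, l.2 + r.2)
termination_by hi - lo
decreasing_by all_goals omega

def reset_flashed_alt (grid : List (List Int)) : List (List Int) × Int :=
  pvSolveRows grid 0 grid.length

-- ===== PRECONDITION & SPEC =====
def Spec_reset_flashed (grid : List (List Int)) (out : List (List Int) × Int) : Prop := out = reset_flashed_alt grid
instance (grid : List (List Int)) (out : List (List Int) × Int) : Decidable (Spec_reset_flashed grid out) := by unfold Spec_reset_flashed; infer_instance

-- ===== CLAIM (what is proved, stated in full; the proofs are below) =====
def Claim_equal_reset_flashed : Prop := ∀ (grid : List (List Int)), Dom_reset_flashed grid → Spec_reset_flashed grid (reset_flashed grid)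

-- ===== LEMMAS AND PROOFS =====

theorem pv_set_append_cons {α : Type} (p : List α) (a b : α) (r : List α) :
    (p ++ a :: r).set p.length b = p ++ b :: r := by
  induction p with
  | nil => rfl
  | cons x xs ih => simp [ih]

theorem pv_set_getElem?_self {α : Type} (l : List α) (i : Nat) (a : α)
    (h : l[i]? = some a) : l.set i a = l := by
  induction l generalizing i with
  | nil => simp at h
  | cons x xs ih =>
    cases i with
    | zero => simp_all
    | succ j => simp_all [List.set]

-- inner loop over one row's cells (row index x), having already processed prefix `pre`
theorem pv_inner (x : Nat) (row : List Int) : ∀ (pre : List Int) (g : List (List Int)) (c : Int),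
    g[x]? = some (pre ++ row) →
    ((row.zipIdx pre.length).map (fun cy => (x, cy.2, cy.1))).foldl pvStepA (g, c)
      = (g.set x (pre ++ row.map (fun v => if v > 9 then 0 else v)),
         c + ((row.filter (fun v => decide (v > 9))).length : Int)) := by
  induction row with
  | nil =>
    intro pre g c h
    simp [pv_set_getElem?_self g x pre (by simpa using h)]
  | cons col rest ih =>
    intro pre g c h
    obtain ⟨hlt, -⟩ := List.getElem?_eq_some_iff.mp h
    by_cases hcol : col > 9
    · have hstep : pvStepA (g, c) (x, pre.length, col)
          = (g.set x (pre ++ 0 :: rest), c + 1) := by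
        simp [pvStepA, hcol, List.getD, h]
      have hget : (g.set x (pre ++ 0 :: rest))[x]? = some ((pre ++ [0]) ++ rest) := by
        simp [hlt]
      have := ih (pre ++ [(0 : Int)]) (g.set x (pre ++ 0 :: rest)) (c + 1) hget
      simp only [List.zipIdx_cons, List.map_cons, List.foldl_cons, hstep]
      rw [show pre.length + 1 = (pre ++ [(0:Int)]).length by simp, this]
      simp [hcol, List.set_set]
      omega
    · have hstep : pvStepA (g, c) (x, pre.length, col) = (g, c) := by
        simp [pvStepA, hcol]
      have := ih (pre ++ [col]) g c (by simpa using h)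
      simp only [List.zipIdx_cons, List.map_cons, List.foldl_cons, hstep]
      rw [show pre.length + 1 = (pre ++ [col]).length by simp, this]
      simp [hcol]

-- outer loop over remaining rows, with `done` rows already replaced
theorem pv_outer (rows : List (List Int)) : ∀ (done : List (List Int)) (c : Int),
    ((rows.zipIdx done.length).flatMap
        (fun rx => (rx.1.zipIdx).map (fun cy => (rx.2, cy.2, cy.1)))).foldl pvStepA (done ++ rows, c)
      = (done ++ rows.map (fun row => row.map (fun v => if v > 9 then 0 else v)),
         c + ((rows.flatMap (fun row => row.filter (fun v => decide (v > 9)))).length : Int)) := by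
  induction rows with
  | nil => intro done c; simp
  | cons row rest ih =>
    intro done c
    have hget : (done ++ row :: rest)[done.length]? = some ([] ++ row) := by
      simp
    have hinner := pv_inner done.length row [] (done ++ row :: rest) c hget
    simp only [List.nil_append, List.length_nil] at hinner
    simp only [List.zipIdx_cons, List.flatMap_cons, List.foldl_append]
    rw [hinner]
    rw [pv_set_append_cons done row (row.map (fun v => if v > 9 then 0 else v)) rest,
        show done ++ (row.map (fun v => if v > 9 then 0 else v)) :: rest
           = (done ++ [row.map (fun v => if v > 9 then 0 else v)]) ++ rest by simp, show done.length + 1 = (done ++ [row.map (fun v => if v > 9 then 0 else v)]).length by simp,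
        ih (done ++ [row.map (fun v => if v > 9 then 0 else v)])]
    simp
    omega

-- pvSolveRow on a range [lo, hi) computes map/filter of that segment
theorem pv_row_spec (row : List Int) : ∀ (n lo hi : Nat), lo ≤ hi → hi ≤ row.length → hi - lo = n →
    pvSolveRow row lo hi =
      (((row.drop lo).take n).map (fun v => if v > 9 then 0 else v),
       (((((row.drop lo).take n).filter (fun v => decide (v > 9))).length : Int))) := by
  intro n
  induction n using Nat.strong_induction_on with
  | _ n ih =>
    intro lo hi hle hhi hn
    match n with
    | 0 =>
      rw [pvSolveRow]
      simp [hn]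
    | 1 =>
      have hlt : lo < row.length := by omega
      have hdrop : row.drop lo = row[lo] :: row.drop (lo + 1) :=
        List.drop_eq_getElem_cons hlt
      rw [pvSolveRow]
      simp only [hn]
      simp only [if_true]
      rw [hdrop]
      simp only [List.take_succ_cons, List.take_zero, List.map_cons, List.map_nil,
        List.getD, List.getElem?_eq_getElem hlt, Option.getD_some]
      split_ifs <;> simp_all
    | Nat.succ (Nat.succ m) =>
      have h2 : hi - lo ≠ 0 := by omega
      have h1 : hi - lo ≠ 1 := by omega
      rw [pvSolveRow]
      simp only [h2, h1, if_false]
      have hmlo : lo ≤ (lo + hi) / 2 := by omega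
      have hmhi : (lo + hi) / 2 ≤ hi := by omega
      have hl := ih ((lo + hi) / 2 - lo) (by omega) lo ((lo + hi) / 2) hmlo (by omega) rfl
      have hr := ih (hi - (lo + hi) / 2) (by omega) ((lo + hi) / 2) hi hmhi hhi rfl
      rw [hl, hr]
      have hseg : (row.drop lo).take ((lo + hi) / 2 - lo)
            ++ (row.drop ((lo + hi) / 2)).take (hi - (lo + hi) / 2)
          = (row.drop lo).take (m + 2) := by
        have : row.drop ((lo + hi) / 2) = (row.drop lo).drop ((lo + hi) / 2 - lo) := by
          rw [List.drop_drop]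
          congr 1
          omega
        rw [this, ← List.take_add]
        congr 1
        omega
      rw [← hseg]
      simp only [List.map_append, List.filter_append, List.length_append, Nat.cast_add]

theorem pv_rows_spec (grid : List (List Int)) : ∀ (n lo hi : Nat), lo ≤ hi → hi ≤ grid.length → hi - lo = n →
    pvSolveRows grid lo hi =
      (((grid.drop lo).take n).map (fun row => row.map (fun v => if v > 9 then 0 else v)),
       (((((grid.drop lo).take n).flatMap (fun row => row.filter (fun v => decide (v > 9)))).length : Int))) := by
  intro n
  induction n using Nat.strong_induction_on with
  | _ n ih =>
    intro lo hi hle hhi hn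
    match n with
    | 0 =>
      rw [pvSolveRows]
      simp [hn]
    | 1 =>
      have hlt : lo < grid.length := by omega
      have hdrop : grid.drop lo = grid[lo] :: grid.drop (lo + 1) :=
        List.drop_eq_getElem_cons hlt
      have hgd : grid.getD lo [] = grid[lo] := by
        simp [List.getD, List.getElem?_eq_getElem hlt]
      rw [pvSolveRows]
      simp only [hn]
      simp only [if_true]
      simp only [hgd,
        pv_row_spec grid[lo] grid[lo].length 0 grid[lo].length (Nat.zero_le _) (le_refl _) rfl]
      rw [hdrop]
      simp only [List.drop_zero, List.take_length, List.take_succ_cons, List.take_zero,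
        List.map_cons, List.map_nil, List.flatMap_cons, List.flatMap_nil, List.append_nil]
      rw [if_neg (by omega : ¬(1:Nat) = 0)]
    | Nat.succ (Nat.succ m) =>
      have h2 : hi - lo ≠ 0 := by omega
      have h1 : hi - lo ≠ 1 := by omega
      rw [pvSolveRows]
      simp only [h2, h1, if_false]
      have hmlo : lo ≤ (lo + hi) / 2 := by omega
      have hmhi : (lo + hi) / 2 ≤ hi := by omega
      have hl := ih ((lo + hi) / 2 - lo) (by omega) lo ((lo + hi) / 2) hmlo (by omega) rfl
      have hr := ih (hi - (lo + hi) / 2) (by omega) ((lo + hi) / 2) hi hmhi hhi rfl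
      rw [hl, hr]
      have hseg : (grid.drop lo).take ((lo + hi) / 2 - lo)
            ++ (grid.drop ((lo + hi) / 2)).take (hi - (lo + hi) / 2)
          = (grid.drop lo).take (m + 2) := by
        have : grid.drop ((lo + hi) / 2) = (grid.drop lo).drop ((lo + hi) / 2 - lo) := by
          rw [List.drop_drop]
          congr 1
          omega
        rw [this, ← List.take_add]
        congr 1
        omega
      rw [← hseg]
      simp only [List.map_append, List.flatMap_append, List.length_append, Nat.cast_add]

-- ===== VERDICT (by name: the statement is the Claim_ definition above) =====
theorem reset_flashed_spec : Claim_equal_reset_flashed := by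
  intro grid _
  show reset_flashed grid = reset_flashed_alt grid
  have hcopy : pvCopyGrid grid = grid := by
    simp [pvCopyGrid, PySem.List.slice_none_none]
  have ha := pv_outer grid [] 0
  have hb := pv_rows_spec grid grid.length 0 grid.length (Nat.zero_le _) (le_refl _) rfl
  simp only [List.drop_zero, List.take_length] at hb
  simp only [reset_flashed, reset_flashed_alt, pvCellsA, hcopy, hb]
  simpa using ha
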